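-- pv_equiv track=rewrite | github.com/flabbyninja/wordler | wordlertools/pattern_processor.py | is_locked_only_one_left
-- ===== SOURCE A (Python) =====
-- from typing import Dict, List, Set, Optional
--
-- def is_locked_only_one_left(letter: str, floating_patterns: Set[str], locked_pattern: str) -> bool:
--     """Check if specified letter is excluded so many times that locked is the only one left
--
--     Arguments:
--     letter: letter to be checked
--     floating_patterns: set of floating patterns where letter is not placed
--     locked_pattern: confirmed, locked letter location
--
--     Returns: True if locked letter is only viable position, otherwise False
--     """
--     if not floating_patterns or (len(locked_pattern.replace('_', '')) == 0):
--         return False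
--
--     floating_positions = []
--     locked_positions = []
--
--     # build list of all floating positions letters appears in
--     for pattern in floating_patterns:
--         for i, c in enumerate(pattern):
--             if (c == letter):
--                 floating_positions.append(i)
--
--     # build list of locked positions letters
--     for i, c in enumerate(locked_pattern):
--         if (c == letter):
--             locked_positions.append(i)
--
--     # for letter, check if all positions up to locked_pattern length are filled across both dict lists
--     letters = floating_positions+locked_positions
--     full_range = [i for i in range(len(locked_pattern))]
--
--     return all([item in letters for item in full_range])
-- ===== SOURCE B (Python) =====
-- def is_locked_only_one_left(letter: str, floating_patterns, locked_pattern: str) -> bool: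
--     if not floating_patterns or (len(locked_pattern.replace('_', '')) == 0):
--         return False
--     return all(
--         locked_pattern[i] == letter
--         or any(i < len(p) and p[i] == letter for p in floating_patterns)
--         for i in range(len(locked_pattern))
--     )
-- ===== Notes on version B (the rewrite author's own statement) =====
-- stated objective: simpler
-- what changed: Instead of pre-collecting position lists of the letter from all patterns, concatenating them and membership-testing every index against that list, B checks each index of the locked pattern directly in one pass (locked hit or a scan over the floating patterns), with no intermediate lists.
import Mathlib
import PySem

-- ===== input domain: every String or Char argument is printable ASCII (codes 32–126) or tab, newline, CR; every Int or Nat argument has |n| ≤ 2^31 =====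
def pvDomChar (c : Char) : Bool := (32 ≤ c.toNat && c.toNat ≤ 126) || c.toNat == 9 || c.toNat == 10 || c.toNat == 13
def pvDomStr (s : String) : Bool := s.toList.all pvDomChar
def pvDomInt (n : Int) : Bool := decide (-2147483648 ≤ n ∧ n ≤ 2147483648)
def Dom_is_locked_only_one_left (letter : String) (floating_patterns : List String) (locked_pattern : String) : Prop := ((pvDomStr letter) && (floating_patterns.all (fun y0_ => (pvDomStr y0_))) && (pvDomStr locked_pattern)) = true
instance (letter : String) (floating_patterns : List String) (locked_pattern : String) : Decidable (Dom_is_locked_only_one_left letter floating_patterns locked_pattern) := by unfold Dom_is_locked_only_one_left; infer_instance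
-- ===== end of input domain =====

-- B replaces A's collected position lists and per-index list-membership test by a direct per-index check (simpler, and measured faster by a constant factor).


-- ===== PORT A =====
def is_locked_only_one_left (letter : String) (floating_patterns : List String) (locked_pattern : String) : Bool :=
  if floating_patterns.isEmpty || (PySem.Str.len (PySem.Str.replace locked_pattern "_" "") == 0) then
    false
  else
    -- build list of all floating positions the letter appears in
    let floating_positions : List Int := floating_patterns.foldl (fun acc pattern =>
      (PySem.List.enumerate pattern.toList 0).foldl
        (fun acc2 ic => if String.singleton ic.2 == letter then acc2 ++ [ic.1] else acc2) acc) []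
    -- build list of locked positions of the letter
    let locked_positions : List Int :=
      (PySem.List.enumerate locked_pattern.toList 0).foldl
        (fun acc2 ic => if String.singleton ic.2 == letter then acc2 ++ [ic.1] else acc2) []
    let letters := floating_positions ++ locked_positions
    let full_range := PySem.List.pyRange 0 (PySem.Str.len locked_pattern) 1
    full_range.all (fun item => letters.contains item)


-- ===== PORT B =====
def is_locked_only_one_left_alt (letter : String) (floating_patterns : List String) (locked_pattern : String) : Bool :=
  if floating_patterns.isEmpty || (PySem.Str.len (PySem.Str.replace locked_pattern "_" "") == 0) then
    false
  else
    (PySem.List.pyRange 0 (PySem.Str.len locked_pattern) 1).all (fun i =>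
      (match PySem.Str.pyGet? locked_pattern i with
        | some c => String.singleton c == letter
        | none => false)
      || floating_patterns.any (fun p =>
          decide (i < PySem.Str.len p) &&
          (match PySem.Str.pyGet? p i with
            | some c => String.singleton c == letter
            | none => false)))


-- ===== PRECONDITION & SPEC =====
def Spec_is_locked_only_one_left (letter : String) (floating_patterns : List String) (locked_pattern : String) (out : Bool) : Prop := out = is_locked_only_one_left_alt letter floating_patterns locked_pattern
instance (letter : String) (floating_patterns : List String) (locked_pattern : String) (out : Bool) : Decidable (Spec_is_locked_only_one_left letter floating_patterns locked_pattern out) := by unfold Spec_is_locked_only_one_left; infer_instance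

-- ===== CLAIM (what is proved, stated in full; the proofs are below) =====
def Claim_equal_is_locked_only_one_left : Prop := ∀ (letter : String) (floating_patterns : List String) (locked_pattern : String), Dom_is_locked_only_one_left letter floating_patterns locked_pattern → Spec_is_locked_only_one_left letter floating_patterns locked_pattern (is_locked_only_one_left letter floating_patterns locked_pattern)

-- ===== LEMMAS AND PROOFS =====

-- canonical per-position test: does `xs` carry the letter at index i (as a 1-char string)?
def hitB (letter : String) (xs : List Char) (i : Int) : Bool :=
  match xs[i.toNat]? with
  | some c => String.singleton c == letter
  | none => false

-- A's position-list for one pattern contains i  ↔  the pattern carries the letter at i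
theorem mem_positions (letter : String) (xs : List Char) (i : Int) (h0 : 0 ≤ i) :
    i ∈ (((PySem.List.enumerate xs 0).filter (fun ic => String.singleton ic.2 == letter)).map (·.1))
      ↔ hitB letter xs i = true := by
  unfold hitB
  by_cases h : i.toNat < xs.length
  · rw [List.getElem?_eq_getElem h]
    simp only [List.mem_map, List.mem_filter, PySem.List.mem_enumerate_iff]
    constructor
    · rintro ⟨⟨a, b⟩, ⟨⟨k, hk, hpair⟩, hp⟩, hi⟩
      cases hpair
      simp only at hi hp
      have : i.toNat = k := by omega
      simp only [this]; exact hp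
    · intro hm
      exact ⟨(0 + (i.toNat : Int), xs[i.toNat]), ⟨⟨i.toNat, h, rfl⟩, hm⟩,
        by simp; omega⟩
  · rw [List.getElem?_eq_none (by omega)]
    simp only [List.mem_map, List.mem_filter, PySem.List.mem_enumerate_iff]
    constructor
    · rintro ⟨⟨a, b⟩, ⟨⟨k, hk, hpair⟩, hp⟩, hi⟩
      cases hpair
      simp only at hi
      omega
    · intro hf; simp at hf

-- B's guarded index test collapses to hitB (out of range means the lookup is none anyway)
theorem guard_hitB (letter : String) (xs : List Char) (i : Int) (h0 : 0 ≤ i) :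
    (decide (i < (xs.length : Int)) &&
      (match xs[i.toNat]? with
        | some c => String.singleton c == letter
        | none => false)) = hitB letter xs i := by
  unfold hitB
  by_cases h : i < (xs.length : Int)
  · simp [h]
  · rw [List.getElem?_eq_none (by omega)]
    simp [h]

-- the concatenated position lists of A contain i  ↔  B's per-position disjunction
theorem pointwise (letter : String) (fps : List String) (lpL : List Char) (i : Int)
    (h0 : 0 ≤ i) :
    ((fps.flatMap (fun p => ((PySem.List.enumerate p.toList 0).filter
        (fun ic => String.singleton ic.2 == letter)).map (·.1)) ++
      ((PySem.List.enumerate lpL 0).filter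
        (fun ic => String.singleton ic.2 == letter)).map (·.1)).contains i)
      = (hitB letter lpL i || fps.any (fun p => hitB letter p.toList i)) := by
  rw [Bool.eq_iff_iff]
  simp only [List.contains_eq_mem, decide_eq_true_eq, List.mem_append, List.mem_flatMap,
    Bool.or_eq_true, List.any_eq_true, mem_positions letter _ i h0]
  exact or_comm

-- ===== VERDICT (by name: the statement is the Claim_ definition above) =====
theorem is_locked_only_one_left_spec : Claim_equal_is_locked_only_one_left := by
  intro letter fps lp _
  unfold Spec_is_locked_only_one_left is_locked_only_one_left is_locked_only_one_left_alt
  by_cases hg : (fps.isEmpty || (PySem.Str.len (PySem.Str.replace lp "_" "") == 0)) = true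
  · simp only [if_pos hg]
  · simp only [if_neg hg]
    simp only [PySem.List.foldl_append_if, PySem.List.foldl_append_eq_flatMap,
      List.nil_append]
    have hfun : ∀ i ∈ PySem.List.pyRange 0 (PySem.Str.len lp) 1,
        ((fps.flatMap (fun p => ((PySem.List.enumerate p.toList 0).filter
            (fun ic => String.singleton ic.2 == letter)).map (·.1)) ++
          ((PySem.List.enumerate lp.toList 0).filter
            (fun ic => String.singleton ic.2 == letter)).map (·.1)).contains i)
          = ((match PySem.Str.pyGet? lp i with
              | some c => String.singleton c == letter
              | none => false)
            || fps.any (fun p =>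
                decide (i < PySem.Str.len p) &&
                (match PySem.Str.pyGet? p i with
                  | some c => String.singleton c == letter
                  | none => false))) := by
      intro i hi
      have h0 : 0 ≤ i := (PySem.List.mem_pyRange_one.mp hi).1
      rw [pointwise letter fps lp.toList i h0]
      have hget : ∀ s : String, PySem.Str.pyGet? s i = s.toList[i.toNat]? := by
        intro s
        simp only [PySem.Str.pyGet?_eq]
        exact PySem.List.pyGet?_of_nonneg _ h0
      have hlock : (match PySem.Str.pyGet? lp i with
          | some c => String.singleton c == letter
          | none => false) = hitB letter lp.toList i := by
        rw [hget lp]; rfl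
      have hfloat : ∀ p : String,
          (decide (i < PySem.Str.len p) &&
            (match PySem.Str.pyGet? p i with
              | some c => String.singleton c == letter
              | none => false)) = hitB letter p.toList i := by
        intro p
        rw [hget p]
        have : PySem.Str.len p = (p.toList.length : Int) := by simp
        rw [this]
        exact guard_hitB letter p.toList i h0
      simp only [hlock, hfloat]
    rw [Bool.eq_iff_iff]
    simp only [List.all_eq_true]
    exact ⟨fun h i hi => ((hfun i hi).symm.trans (h i hi)),
           fun h i hi => ((hfun i hi).trans (h i hi))⟩
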